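-- pv_equiv track=rewrite | github.com/LauraPeraltaV85/holberton-higher_level_programming | 0x03-python-data_structures/10-divisible_by_2.py | divisible_by_2
-- ===== SOURCE A (Python) =====
-- def divisible_by_2(my_list=[]):
--     new = []
--     for n in range(len(my_list)):
--         if n % 2 == 0:
--             new.append(1)
--         else:
--             new.append(0)
--     return new
-- ===== SOURCE B (Python) =====
-- def divisible_by_2(my_list=[]):
--     n = len(my_list)
--     return ([1, 0] * ((n + 1) // 2))[:n]
-- ===== Notes on version B (the rewrite author's own statement) =====
-- stated objective: simpler
-- what changed: Replaces the per-index loop with its if/else and repeated appends by a closed-form construction: tile the two-element pattern ceil(n/2) times via list repetition and slice to length n.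
import Mathlib
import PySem

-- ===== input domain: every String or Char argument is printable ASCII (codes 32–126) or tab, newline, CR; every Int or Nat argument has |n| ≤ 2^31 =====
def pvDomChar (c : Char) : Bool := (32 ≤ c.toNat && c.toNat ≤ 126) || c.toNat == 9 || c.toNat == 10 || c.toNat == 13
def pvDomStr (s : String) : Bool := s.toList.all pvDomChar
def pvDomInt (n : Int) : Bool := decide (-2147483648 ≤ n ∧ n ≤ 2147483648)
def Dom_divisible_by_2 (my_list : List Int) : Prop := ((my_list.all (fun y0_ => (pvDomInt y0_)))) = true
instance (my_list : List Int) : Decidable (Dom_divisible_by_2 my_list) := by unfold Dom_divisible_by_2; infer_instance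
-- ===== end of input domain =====

-- B replaces the per-index loop with a closed-form tiling: [1,0] repeated ceil(n/2) times, sliced to n.

-- ===== PORT A =====
def divisible_by_2 (my_list : List Int) : List Int :=
  (PySem.List.pyRange 0 (my_list.length : Int) 1).foldl
    (fun new n => new ++ [if PySem.Int.mod n 2 = 0 then (1 : Int) else 0]) []

-- ===== PORT B =====
def divisible_by_2_alt (my_list : List Int) : List Int :=
  let n : Int := (my_list.length : Int)
  PySem.List.slice
    (List.flatten (List.replicate (PySem.Int.floordiv (n + 1) 2).toNat ([1, 0] : List Int)))
    none (some n)

-- ===== PRECONDITION & SPEC =====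
def Spec_divisible_by_2 (my_list : List Int) (out : List Int) : Prop := out = divisible_by_2_alt my_list
instance (my_list : List Int) (out : List Int) : Decidable (Spec_divisible_by_2 my_list out) := by unfold Spec_divisible_by_2; infer_instance

-- ===== CLAIM (what is proved, stated in full; the proofs are below) =====
def Claim_equal_divisible_by_2 : Prop := ∀ (my_list : List Int), Dom_divisible_by_2 my_list → Spec_divisible_by_2 my_list (divisible_by_2 my_list)

-- ===== LEMMAS AND PROOFS =====

-- the common closed form: the 0/1 pattern of length n
def pvPat (n : Nat) : List Int := (List.range n).map (fun k => if k % 2 = 0 then (1 : Int) else 0)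

lemma divA_eq_pat (my_list : List Int) : divisible_by_2 my_list = pvPat my_list.length := by
  unfold divisible_by_2 pvPat
  rw [PySem.List.foldl_append_singleton_eq_map, PySem.List.pyRange_one, List.map_map]
  simp only [Int.sub_zero, Int.toNat_natCast]
  refine List.map_congr_left (fun k hk => ?_)
  simp only [Function.comp_apply, Int.zero_add]
  have hm : PySem.Int.mod (k : Int) 2 = (((k % 2 : Nat)) : Int) := by
    exact_mod_cast PySem.Int.mod_natCast k 2
  rw [hm]
  by_cases h : k % 2 = 0 <;> simp [h]
  omega

lemma flatten_replicate_pat (k : Nat) :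
    List.flatten (List.replicate k ([1, 0] : List Int)) = pvPat (2 * k) := by
  induction k with
  | zero => simp [pvPat]
  | succ k ih =>
    rw [List.replicate_succ', List.flatten_append, ih]
    unfold pvPat
    have h2 : 2 * (k + 1) = 2 * k + 1 + 1 := by omega
    rw [h2, List.range_succ, List.range_succ, List.map_append, List.map_append,
      List.append_assoc]
    have e1 : (2 * k) % 2 = 0 := by omega
    have e2 : (2 * k + 1) % 2 = 1 := by omega
    simp [e1, e2]

lemma divB_eq_pat (my_list : List Int) : divisible_by_2_alt my_list = pvPat my_list.length := by
  unfold divisible_by_2_alt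
  show PySem.List.slice
      (List.flatten (List.replicate (PySem.Int.floordiv ((my_list.length : Int) + 1) 2).toNat ([1, 0] : List Int)))
      none (some (my_list.length : Int)) = pvPat my_list.length
  set n := my_list.length with hn
  have hf : PySem.Int.floordiv ((n : Int) + 1) 2 = (((n + 1) / 2 : Nat) : Int) := by
    exact_mod_cast PySem.Int.floordiv_natCast (n + 1) 2
  rw [hf]
  simp only [Int.toNat_natCast]
  rw [flatten_replicate_pat, PySem.List.slice_to_natCast]
  unfold pvPat
  rw [← List.map_take, List.take_range]
  have : min n (2 * ((n + 1) / 2)) = n := by omega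
  rw [this]

-- ===== VERDICT (by name: the statement is the Claim_ definition above) =====
theorem divisible_by_2_spec : Claim_equal_divisible_by_2 := by
  intro my_list _
  unfold Spec_divisible_by_2
  rw [divA_eq_pat, divB_eq_pat]
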